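-- pv_equiv track=rewrite | github.com/pushpa-info-14/python-programming | LeetCode/2000-2500/Q2290 Minimum Obstacle Removal To Reach Corner.py | minimumObstacles2
-- ===== SOURCE A (Python) =====
-- import heapq
-- from typing import List
--
-- def minimumObstacles2(grid: List[List[int]]) -> int:
--     m = len(grid)
--     n = len(grid[0])
--     directions = [[0, 1], [0, -1], [1, 0], [-1, 0]]
--     q = [(0, 0, 0)]  # (obstacles, r, c)
--     visited = {(0, 0)}
--
--     while q:
--         obstacles, r, c = heapq.heappop(q)
--
--         if (r, c) == (m - 1, n - 1):
--             return obstacles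
--         for i in range(4):
--             newR = r + directions[i][0]
--             newC = c + directions[i][1]
--
--             if (newR, newC) in visited or newR < 0 or newC < 0 or newR == m or newC == n:
--                 continue
--             heapq.heappush(q, (obstacles + grid[newR][newC], newR, newC))
--             visited.add((newR, newC))
-- ===== SOURCE B (Python) =====
-- def minimumObstacles2(grid):
--     m = len(grid)
--     n = len(grid[0])
--     frontier = {(0, 0): 0}  # discovered but not yet expanded: cell -> obstacle count
--     settled = set()         # expanded cells
--     while frontier:
--         best, cost = None, 0
--         for p, v in frontier.items():
--             if best is None or v < cost or (v == cost and p < best):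
--                 best, cost = p, v
--         del frontier[best]
--         r, c = best
--         if r == m - 1 and c == n - 1:
--             return cost
--         settled.add(best)
--         for nr, nc in ((r, c + 1), (r, c - 1), (r + 1, c), (r - 1, c)):
--             if 0 <= nr < m and 0 <= nc < n and (nr, nc) not in settled and (nr, nc) not in frontier:
--                 frontier[(nr, nc)] = cost + grid[nr][nc]
--     return -1  # unreachable on non-empty rectangular grids
-- ===== Notes on version B (the rewrite author's own statement) =====
-- stated objective: alternative
-- what changed: A's heap of (obstacles, r, c) triples with a visited set marked on push is replaced by a frontier map cell -> obstacle count whose arg-min is found by an explicit linear scan each round plus a settled set, with seen-ness derived from settled-or-frontier membership instead of a visited set, deletion from the map instead of heap extraction, and the four neighbours relaxed from tuples instead of a directions table.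
-- outside the precondition, e.g. on minimumObstacles2([[0, 7, 6, 5], [6, 8, 2], [0, 8, 1, 4], [1, 4, 1, 2]]): A returns 14, B returns 14
import Mathlib
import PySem

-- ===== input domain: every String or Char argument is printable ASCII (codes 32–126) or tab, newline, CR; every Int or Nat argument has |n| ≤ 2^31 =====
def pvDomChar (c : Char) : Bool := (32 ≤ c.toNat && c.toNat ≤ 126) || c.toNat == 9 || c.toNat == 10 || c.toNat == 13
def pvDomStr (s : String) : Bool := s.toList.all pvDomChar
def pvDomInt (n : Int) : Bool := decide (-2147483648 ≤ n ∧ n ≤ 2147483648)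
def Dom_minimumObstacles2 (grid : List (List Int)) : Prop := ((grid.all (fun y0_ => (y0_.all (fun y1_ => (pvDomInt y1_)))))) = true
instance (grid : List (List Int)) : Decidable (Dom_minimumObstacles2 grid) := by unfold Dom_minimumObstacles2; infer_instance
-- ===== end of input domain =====

-- B replaces A's heap of (cost, r, c) triples + visited-marked-on-push set by a frontier MAP
-- cell -> cost scanned linearly for its arg-min each round, with a settled set; seen-ness is
-- derived from settled ∪ frontier instead of a visited set. Alternative structure, same values.


-- ===== PORT A =====
-- Python tuple comparison (obstacles, r, c) < (obstacles', r', c'): lexicographic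
def lexLt3 (a b : Int × Int × Int) : Bool :=
  decide (a.1 < b.1) ||
    (a.1 == b.1 && (decide (a.2.1 < b.2.1) || (a.2.1 == b.2.1 && decide (a.2.2 < b.2.2))))

-- grid[r][c]; exact where both indexings succeed (guaranteed by the bounds guards under Pre_);
-- the .getD 0 default is only reached where Python raises IndexError (excluded by Pre_)
def cellAt (grid : List (List Int)) (r c : Int) : Int :=
  (PySem.List.pyGet? ((PySem.List.pyGet? grid r).getD []) c).getD 0

-- heapq.heappop: removes and returns the smallest element of the heap (Python tuple order).
-- Since A touches q only through heappush/heappop starting from a singleton, q is always a valid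
-- heap and heappop is exactly "extract the minimum of the multiset"; heappush is modeled as append.
def heapPopA (x : Int × Int × Int) (xs : List (Int × Int × Int)) :
    (Int × Int × Int) × List (Int × Int × Int) :=
  let mn := xs.foldl (fun acc y => if lexLt3 y acc then y else acc) x
  (mn, (x :: xs).erase mn)

-- body of A's `for i in range(4)` loop: d = directions[i]
def stepA (grid : List (List Int)) (m n obstacles r c : Int)
    (st : List (Int × Int × Int) × PySem.Set (Int × Int)) (d : Int × Int) :
    List (Int × Int × Int) × PySem.Set (Int × Int) :=
  let newR := r + d.1
  let newC := c + d.2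
  if st.2.contains (newR, newC) = true ∨ newR < 0 ∨ newC < 0 ∨ newR = m ∨ newC = n then st
  else (st.1 ++ [(obstacles + cellAt grid newR newC, newR, newC)], st.2.add (newR, newC))

-- A's `while q` loop; fuel m*n+1 bounds the iteration count (each cell is pushed at most once,
-- so there are at most m*n pops); the -1 defaults (fuel out / empty q, where Python would fall
-- off the loop returning None) are not reached on Pre_ inputs
def goA (grid : List (List Int)) (m n : Int) :
    Nat → List (Int × Int × Int) → PySem.Set (Int × Int) → Int
  | 0, _, _ => -1
  | _ + 1, [], _ => -1
  | fuel + 1, x :: xs, visited =>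
    let pop := heapPopA x xs
    if pop.1.2.1 = m - 1 ∧ pop.1.2.2 = n - 1 then pop.1.1
    else
      let st := [((0 : Int), (1 : Int)), (0, -1), (1, 0), (-1, 0)].foldl
        (stepA grid m n pop.1.1 pop.1.2.1 pop.1.2.2) (pop.2, visited)
      goA grid m n fuel st.1 st.2

def minimumObstacles2 (grid : List (List Int)) : Int :=
  let m : Int := grid.length
  let n : Int := ((PySem.List.pyGet? grid 0).getD []).length
  goA grid m n ((m * n).toNat + 1) [(0, 0, 0)] (PySem.Set.ofList [((0 : Int), (0 : Int))])

-- ===== PORT B =====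
-- B's comparison `v < cost or (v == cost and p < best)` on an item (p, v) of the frontier map
-- (`p < best` is Python's lexicographic pair comparison)
def itemLt (a b : (Int × Int) × Int) : Bool :=
  decide (a.2 < b.2) ||
    (a.2 == b.2 && (decide (a.1.1 < b.1.1) || (a.1.1 == b.1.1 && decide (a.1.2 < b.1.2))))

-- B's `for p, v in frontier.items()` arg-min scan; the accumulator is None before the first item
def scanMin : Option ((Int × Int) × Int) → List ((Int × Int) × Int) → Option ((Int × Int) × Int)
  | acc, [] => acc
  | none, pv :: rest => scanMin (some pv) rest
  | some best, pv :: rest => scanMin (if itemLt pv best then some pv else some best) rest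

-- grid[nr][nc] for a neighbour cell given as a pair (defaults unreachable under Pre_)
def cellB (grid : List (List Int)) (p : Int × Int) : Int :=
  (PySem.List.pyGet? ((PySem.List.pyGet? grid p.1).getD []) p.2).getD 0

-- one guarded relaxation: `if 0 <= nr < m and 0 <= nc < n and (nr,nc) not in settled and
-- (nr,nc) not in frontier: frontier[(nr,nc)] = cost + grid[nr][nc]`
def relaxB (grid : List (List Int)) (m n cost : Int)
    (st : PySem.Dict (Int × Int) Int × PySem.Set (Int × Int)) (p : Int × Int) :
    PySem.Dict (Int × Int) Int × PySem.Set (Int × Int) :=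
  if 0 ≤ p.1 ∧ p.1 < m ∧ 0 ≤ p.2 ∧ p.2 < n ∧ st.2.contains p = false ∧ st.1.contains p = false
  then (st.1.insert p (cost + cellB grid p), st.2)
  else st

-- B's `while frontier` loop; the four neighbour relaxations are chained in tuple order
def goB (grid : List (List Int)) (m n : Int) :
    Nat → PySem.Dict (Int × Int) Int → PySem.Set (Int × Int) → Int
  | 0, _, _ => -1
  | fuel + 1, f, s =>
    match scanMin none f.items with
    | none => -1
    | some (best, cost) =>
      let f1 := f.erase best
      if best.1 = m - 1 ∧ best.2 = n - 1 then cost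
      else
        let st := relaxB grid m n cost (relaxB grid m n cost (relaxB grid m n cost
          (relaxB grid m n cost (f1, s.add best) (best.1, best.2 + 1)) (best.1, best.2 - 1))
          (best.1 + 1, best.2)) (best.1 - 1, best.2)
        goB grid m n fuel st.1 st.2

def minimumObstacles2_alt (grid : List (List Int)) : Int :=
  let m : Int := grid.length
  let n : Int := ((PySem.List.pyGet? grid 0).getD []).length
  goB grid m n ((m * n).toNat + 1)
    (PySem.Dict.ofList [(((0 : Int), (0 : Int)), (0 : Int))]) PySem.Set.empty

-- ===== PRECONDITION & SPEC =====
-- Pre_ excludes the empty grid, zero-width grids and ragged grids (a row shorter than row 0):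
-- Python A raises IndexError on (almost) all of those; on the rare ragged grids whose short
-- cells are never inspected before the corner is reached, A returns and B returns the same value.
def Pre_minimumObstacles2 (grid : List (List Int)) : Prop :=
  grid ≠ [] ∧ 0 < (grid.headD []).length ∧ ∀ row ∈ grid, (grid.headD []).length ≤ row.length
instance (grid : List (List Int)) : Decidable (Pre_minimumObstacles2 grid) := by
  unfold Pre_minimumObstacles2; infer_instance

def pvWitness_minimumObstacles2 : List (List Int) := [[0, 1], [1, 0]]

def Spec_minimumObstacles2 (grid : List (List Int)) (out : Int) : Prop := out = minimumObstacles2_alt grid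
instance (grid : List (List Int)) (out : Int) : Decidable (Spec_minimumObstacles2 grid out) := by unfold Spec_minimumObstacles2; infer_instance

-- ===== CLAIM (what is proved, stated in full; the proofs are below) =====
def Claim_equal_minimumObstacles2 : Prop := ∀ (grid : List (List Int)), Dom_minimumObstacles2 grid → Pre_minimumObstacles2 grid → Spec_minimumObstacles2 grid (minimumObstacles2 grid)

-- ===== LEMMAS AND PROOFS =====

-- the bijection between A's queue triples (obstacles, r, c) and B's frontier items ((r, c), cost)
def t2i (t : Int × Int × Int) : (Int × Int) × Int := ((t.2.1, t.2.2), t.1)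

lemma t2i_inj : Function.Injective t2i := by
  intro a b h
  obtain ⟨a1, a2, a3⟩ := a; obtain ⟨b1, b2, b3⟩ := b
  simp only [t2i, Prod.mk.injEq] at h
  simp [Prod.mk.injEq]
  omega

lemma itemLt_t2i (a b : Int × Int × Int) : itemLt (t2i a) (t2i b) = lexLt3 a b := rfl

lemma lexLt3_iff (a1 a2 a3 b1 b2 b3 : Int) :
    lexLt3 (a1, a2, a3) (b1, b2, b3) = true ↔
      (a1 < b1 ∨ (a1 = b1 ∧ (a2 < b2 ∨ (a2 = b2 ∧ a3 < b3)))) := by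
  simp [lexLt3]

lemma lexLt3_false_iff (a1 a2 a3 b1 b2 b3 : Int) :
    lexLt3 (a1, a2, a3) (b1, b2, b3) = false ↔
      ¬ (a1 < b1 ∨ (a1 = b1 ∧ (a2 < b2 ∨ (a2 = b2 ∧ a3 < b3)))) := by
  rw [← lexLt3_iff]
  cases h : lexLt3 (a1, a2, a3) (b1, b2, b3) <;> simp

lemma lexLt3_irrefl (a : Int × Int × Int) : lexLt3 a a = false := by
  obtain ⟨a1, a2, a3⟩ := a; rw [lexLt3_false_iff]; omega

lemma lexLt3_antisym {a b : Int × Int × Int}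
    (h : lexLt3 a b = false) (h' : lexLt3 b a = false) : a = b := by
  obtain ⟨a1, a2, a3⟩ := a; obtain ⟨b1, b2, b3⟩ := b
  rw [lexLt3_false_iff] at h h'
  simp only [Prod.mk.injEq]
  omega

-- f ≤ x ≤ z implies f ≤ z
lemma lexLt3_trans_le {f x z : Int × Int × Int}
    (h : lexLt3 x f = false) (h' : lexLt3 z x = false) : lexLt3 z f = false := by
  obtain ⟨a1, a2, a3⟩ := f; obtain ⟨b1, b2, b3⟩ := x; obtain ⟨c1, c2, c3⟩ := z
  rw [lexLt3_false_iff] at h h' ⊢; omega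

-- z < x and f ≤ z imply f ≤ x, i.e. ¬ x < f
lemma lexLt3_le_of_lt_of_le {z x f : Int × Int × Int}
    (h : lexLt3 z x = true) (h' : lexLt3 z f = false) : lexLt3 x f = false := by
  obtain ⟨a1, a2, a3⟩ := z; obtain ⟨b1, b2, b3⟩ := x; obtain ⟨c1, c2, c3⟩ := f
  rw [lexLt3_iff] at h; rw [lexLt3_false_iff] at h' ⊢; omega

-- the same order facts for B's item comparison (itemLt is the same lex order through t2i)
lemma itemLt_irrefl (a : (Int × Int) × Int) : itemLt a a = false := by
  obtain ⟨⟨a1, a2⟩, a3⟩ := a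
  have := lexLt3_irrefl (a3, a1, a2)
  rwa [← itemLt_t2i] at this

lemma itemLt_trans_le {f x z : (Int × Int) × Int}
    (h : itemLt x f = false) (h' : itemLt z x = false) : itemLt z f = false := by
  obtain ⟨⟨f1, f2⟩, f3⟩ := f; obtain ⟨⟨x1, x2⟩, x3⟩ := x; obtain ⟨⟨z1, z2⟩, z3⟩ := z
  have := lexLt3_trans_le (f := (f3, f1, f2)) (x := (x3, x1, x2)) (z := (z3, z1, z2))
  rw [← itemLt_t2i, ← itemLt_t2i, ← itemLt_t2i] at this
  exact this h h'

lemma itemLt_le_of_lt_of_le {z x f : (Int × Int) × Int}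
    (h : itemLt z x = true) (h' : itemLt z f = false) : itemLt x f = false := by
  obtain ⟨⟨f1, f2⟩, f3⟩ := f; obtain ⟨⟨x1, x2⟩, x3⟩ := x; obtain ⟨⟨z1, z2⟩, z3⟩ := z
  have := lexLt3_le_of_lt_of_le (f := (f3, f1, f2)) (x := (x3, x1, x2)) (z := (z3, z1, z2))
  rw [← itemLt_t2i, ← itemLt_t2i, ← itemLt_t2i] at this
  exact this h h'

-- the fold inside heapPopA returns an element of the list …
lemma foldMin_mem (xs : List (Int × Int × Int)) :
    ∀ x, xs.foldl (fun acc y => if lexLt3 y acc then y else acc) x ∈ x :: xs := by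
  induction xs with
  | nil => intro x; simp [List.foldl]
  | cons z zs ih =>
    intro x
    simp only [List.foldl]
    have h := ih (if lexLt3 z x then z else x)
    rcases List.mem_cons.1 h with h' | h'
    · rw [h']; split <;> simp
    · simp [h']

-- … and that element is minimal
lemma foldMin_min (xs : List (Int × Int × Int)) :
    ∀ x, ∀ y ∈ x :: xs,
      lexLt3 y (xs.foldl (fun acc y => if lexLt3 y acc then y else acc) x) = false := by
  induction xs with
  | nil =>
    intro x y hy
    simp only [List.mem_singleton] at hy
    subst hy; simp [List.foldl, lexLt3_irrefl]
  | cons z zs ih =>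
    intro x y hy
    simp only [List.foldl]
    by_cases hzx : lexLt3 z x = true
    · rw [if_pos hzx]
      rcases List.mem_cons.1 hy with rfl | hy'
      · exact lexLt3_le_of_lt_of_le hzx (ih z z (List.mem_cons_self ..))
      · exact ih z y hy'
    · have hzx' : lexLt3 z x = false := by revert hzx; cases lexLt3 z x <;> simp
      rw [if_neg hzx]
      rcases List.mem_cons.1 hy with rfl | hy'
      · exact ih y y (List.mem_cons_self ..)
      · rcases List.mem_cons.1 hy' with rfl | hy''
        · exact lexLt3_trans_le (ih x x (List.mem_cons_self ..)) hzx'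
        · exact ih x y (List.mem_cons_of_mem _ hy'')

-- B's scan returns a minimal element of the scanned items
lemma scanMin_spec (l : List ((Int × Int) × Int)) :
    ∀ b, ∃ r, scanMin (some b) l = some r ∧ r ∈ b :: l ∧
      ∀ y ∈ b :: l, itemLt y r = false := by
  induction l with
  | nil =>
    intro b
    refine ⟨b, rfl, List.mem_cons_self .., ?_⟩
    intro y hy
    simp only [List.mem_singleton] at hy
    rw [hy]; exact itemLt_irrefl b
  | cons pv rest ih =>
    intro b
    by_cases hlt : itemLt pv b = true
    · obtain ⟨r, hr, hmem, hmin⟩ := ih pv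
      refine ⟨r, ?_, ?_, ?_⟩
      · simpa [scanMin, hlt] using hr
      · rcases List.mem_cons.1 hmem with rfl | h
        · exact List.mem_cons_of_mem _ (List.mem_cons_self ..)
        · exact List.mem_cons_of_mem _ (List.mem_cons_of_mem _ h)
      · intro y hy
        rcases List.mem_cons.1 hy with rfl | hy'
        · exact itemLt_le_of_lt_of_le hlt (hmin pv (List.mem_cons_self ..))
        · exact hmin y hy'
    · have hlt' : itemLt pv b = false := by revert hlt; cases itemLt pv b <;> simp
      obtain ⟨r, hr, hmem, hmin⟩ := ih b
      refine ⟨r, ?_, ?_, ?_⟩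
      · simpa [scanMin, hlt'] using hr
      · rcases List.mem_cons.1 hmem with rfl | h
        · exact List.mem_cons_self ..
        · exact List.mem_cons_of_mem _ (List.mem_cons_of_mem _ h)
      · intro y hy
        rcases List.mem_cons.1 hy with rfl | hy'
        · exact hmin y (List.mem_cons_self ..)
        · rcases List.mem_cons.1 hy' with rfl | hy''
          · exact itemLt_trans_le (hmin b (List.mem_cons_self ..)) hlt'
          · exact hmin y (List.mem_cons_of_mem _ hy'')

-- across the permutation, B's arg-min scan picks exactly the image of A's heap minimum
lemma scanMin_eq_min (x : Int × Int × Int) (xs : List (Int × Int × Int))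
    (L : List ((Int × Int) × Int)) (hperm : ((x :: xs).map t2i).Perm L) :
    scanMin none L = some (t2i (heapPopA x xs).1) := by
  cases L with
  | nil => exact absurd hperm.eq_nil (by simp)
  | cons pv rest =>
    obtain ⟨r, hr, hmem, hmin⟩ := scanMin_spec rest pv
    have hrL : r ∈ pv :: rest := hmem
    obtain ⟨u, humem, hu⟩ := List.mem_map.1 (hperm.symm.subset hrL)
    have htmem : (heapPopA x xs).1 ∈ x :: xs := foldMin_mem xs x
    have htL : t2i (heapPopA x xs).1 ∈ pv :: rest :=
      hperm.subset (List.mem_map_of_mem htmem)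
    have h1 : itemLt (t2i (heapPopA x xs).1) r = false := hmin _ htL
    have h2 : lexLt3 u (heapPopA x xs).1 = false := foldMin_min xs x u humem
    rw [← hu, itemLt_t2i] at h1
    rw [show scanMin none (pv :: rest) = scanMin (some pv) rest from rfl, hr, ← hu,
      lexLt3_antisym h2 h1]

-- the frontier after `del frontier[best]`: erasing the unique item with that key
lemma erase_filter (L : List ((Int × Int) × Int)) (k : Int × Int) (v : Int)
    (hnd : (L.map (·.1)).Nodup) (hmem : (k, v) ∈ L) :
    L.filter (fun p => !(p.1 == k)) = L.erase (k, v) := by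
  induction L with
  | nil => cases hmem
  | cons p rest ih =>
    simp only [List.map_cons] at hnd
    obtain ⟨hhead, htail⟩ := List.nodup_cons.1 hnd
    rcases List.mem_cons.1 hmem with rfl | hmem'
    · rw [List.erase_cons_head, List.filter_cons]
      rw [if_neg (by simp)]
      apply List.filter_eq_self.2
      intro q hq
      simp only [Bool.not_eq_eq_eq_not, Bool.not_true, beq_eq_false_iff_ne, ne_eq]
      intro hqk
      exact hhead (List.mem_map.2 ⟨q, hq, hqk⟩)
    · have hp : ¬ (p.1 = k) := by
        intro hpk
        exact hhead (by rw [hpk]; exact List.mem_map.2 ⟨(k, v), hmem', rfl⟩)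
      have hpne : p ≠ (k, v) := by
        intro h; exact hp (by rw [h])
      rw [List.erase_cons_tail (by simpa using hpne), List.filter_cons]
      rw [if_pos (by simp [hp])]
      rw [ih htail hmem']

lemma dict_contains_iff {ν : Type} (d : PySem.Dict (Int × Int) ν) (k : Int × Int) :
    d.contains k = true ↔ ∃ v, (k, v) ∈ d.items := by
  simp only [PySem.Dict.contains, List.any_eq_true, beq_iff_eq]
  constructor
  · rintro ⟨p, hp, hk⟩; exact ⟨p.2, by rwa [show (k, p.2) = p from by rw [← hk]]⟩
  · rintro ⟨v, hv⟩; exact ⟨(k, v), hv, rfl⟩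

lemma dict_contains_erase {ν : Type} (d : PySem.Dict (Int × Int) ν) (k x : Int × Int)
    (h : x ≠ k) : (d.erase k).contains x = d.contains x := by
  rw [Bool.eq_iff_iff, dict_contains_iff, dict_contains_iff]
  constructor
  · rintro ⟨v, hv⟩
    exact ⟨v, (List.mem_filter.1 hv).1⟩
  · rintro ⟨v, hv⟩
    refine ⟨v, List.mem_filter.2 ⟨hv, by simpa using h⟩⟩

-- every queued cell is inside the grid
def InRange (m n : Int) (q : List (Int × Int × Int)) : Prop :=
  ∀ e ∈ q, 0 ≤ e.2.1 ∧ e.2.1 < m ∧ 0 ≤ e.2.2 ∧ e.2.2 < n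

-- the coupling between A's loop state (queue, visited) and B's loop state (frontier, settled)
def Coupled (m n : Int) (a : List (Int × Int × Int) × PySem.Set (Int × Int))
    (b : PySem.Dict (Int × Int) Int × PySem.Set (Int × Int)) : Prop :=
  (a.1.map t2i).Perm b.1.items ∧ b.1.keys.Nodup ∧ InRange m n a.1 ∧
    ∀ x, a.2.contains x = (b.2.contains x || b.1.contains x)

-- A's guarded heap push and B's guarded frontier insertion preserve the coupling
lemma step_rel (grid : List (List Int)) (m n o r c dr dc aR aC : Int)
    (hR : aR = r + dr) (hC : aC = c + dc) (hRm : aR ≤ m) (hCn : aC ≤ n)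
    {a : List (Int × Int × Int) × PySem.Set (Int × Int)}
    {b : PySem.Dict (Int × Int) Int × PySem.Set (Int × Int)} (h : Coupled m n a b) :
    Coupled m n (stepA grid m n o r c a (dr, dc)) (relaxB grid m n o b (aR, aC)) := by
  obtain ⟨hperm, hnd, hrange, hvis⟩ := h
  subst hR; subst hC
  simp only [stepA, relaxB]
  by_cases hg : 0 ≤ r + dr ∧ r + dr < m ∧ 0 ≤ c + dc ∧ c + dc < n ∧
      b.2.contains (r + dr, c + dc) = false ∧ b.1.contains (r + dr, c + dc) = false
  · obtain ⟨h1, h2, h3, h4, h5, h6⟩ := hg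
    have hcont : a.2.contains (r + dr, c + dc) = false := by
      rw [hvis (r + dr, c + dc), h5, h6]; rfl
    rw [if_neg (by
      intro hA
      rcases hA with hA | hA | hA | hA | hA
      · rw [hcont] at hA; cases hA
      · omega
      · omega
      · omega
      · omega), if_pos ⟨h1, h2, h3, h4, h5, h6⟩]
    refine ⟨?_, PySem.Dict.nodup_keys_insert _ _ _ hnd, ?_, ?_⟩
    · simp only [List.map_append, PySem.Dict.items_insert_of_not_contains _ _ h6]
      exact hperm.append_right _
    · intro e he
      rcases List.mem_append.1 he with he' | he'
      · exact hrange e he'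
      · simp only [List.mem_singleton] at he'
        subst he'
        exact ⟨h1, h2, h3, h4⟩
    · intro y
      rw [Bool.eq_iff_iff]
      have hy := hvis y
      constructor
      · intro hc
        rcases (PySem.Set.mem_add _ _ _).1 ((PySem.Set.contains_iff _ _).1 hc) with hxa | hxp
        · rw [← PySem.Set.contains_iff] at hxa
          rw [hy, Bool.or_eq_true] at hxa
          rw [Bool.or_eq_true]
          rcases hxa with h' | h'
          · exact Or.inl h'
          · right
            rw [PySem.Dict.contains_insert, Bool.or_eq_true]
            exact Or.inr h'
        · subst hxp
          simp
      · intro hc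
        rw [Bool.or_eq_true, PySem.Dict.contains_insert, Bool.or_eq_true] at hc
        apply (PySem.Set.contains_iff _ _).2
        apply (PySem.Set.mem_add _ _ _).2
        rcases hc with h' | h' | h'
        · left
          exact (PySem.Set.contains_iff _ _).1 (by rw [hy, h']; simp)
        · right
          exact eq_of_beq h'
        · left
          exact (PySem.Set.contains_iff _ _).1 (by rw [hy, h']; simp)
  · rw [if_pos ?hA, if_neg hg]
    · exact ⟨hperm, hnd, hrange, hvis⟩
    case hA =>
      cases hb2 : b.2.contains (r + dr, c + dc) with
      | true =>
        left
        rw [hvis (r + dr, c + dc), hb2]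
        rfl
      | false =>
        cases hb1 : b.1.contains (r + dr, c + dc) with
        | true =>
          left
          rw [hvis (r + dr, c + dc), hb1, hb2]
          rfl
        | false =>
          have hb : ¬ (0 ≤ r + dr ∧ r + dr < m ∧ 0 ≤ c + dc ∧ c + dc < n) := by
            intro hh
            exact hg ⟨hh.1, hh.2.1, hh.2.2.1, hh.2.2.2, hb2, hb1⟩
          have : r + dr < 0 ∨ c + dc < 0 ∨ r + dr = m ∨ c + dc = n := by omega
          right
          exact this

-- main coupling lemma: from coupled states the two loops return the same value
lemma go_eq (grid : List (List Int)) (m n : Int) :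
    ∀ (fuel : Nat) (qA : List (Int × Int × Int)) (vis : PySem.Set (Int × Int))
      (f : PySem.Dict (Int × Int) Int) (s : PySem.Set (Int × Int)),
      Coupled m n (qA, vis) (f, s) →
      goA grid m n fuel qA vis = goB grid m n fuel f s := by
  intro fuel
  induction fuel with
  | zero => intro qA vis f s _; rfl
  | succ fuel ih =>
    intro qA vis f s h
    obtain ⟨hperm, hnd, hrange, hvis⟩ := h
    cases qA with
    | nil =>
      have hf : f.items = [] := by
        have := hperm.symm.eq_nil
        simpa using this
      simp [goA, goB, hf, scanMin]
    | cons x xs =>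
      have hscan : scanMin none f.items = some (t2i (heapPopA x xs).1) :=
        scanMin_eq_min x xs f.items hperm
      have htmem : (heapPopA x xs).1 ∈ x :: xs := foldMin_mem xs x
      have hq2 : (heapPopA x xs).2 = (x :: xs).erase (heapPopA x xs).1 := rfl
      rcases hQ : heapPopA x xs with ⟨⟨o, r, c⟩, q2⟩
      rw [hQ] at htmem hq2
      simp only at hq2
      simp only [hQ, t2i] at hscan
      have hitem : ((r, c), o) ∈ f.items := by
        have := hperm.subset (List.mem_map_of_mem htmem)
        simpa [t2i] using this
      have hrng := hrange _ htmem
      simp only at hrng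
      -- coupling of the two states right after the pop
      have hbase : Coupled m n (q2, vis) (f.erase (r, c), s.add (r, c)) := by
        refine ⟨?_, ?_, ?_, ?_⟩
        · have hfe : (f.erase (r, c)).items = f.items.erase ((r, c), o) := by
            show f.items.filter (fun p => !(p.1 == (r, c))) = f.items.erase ((r, c), o)
            exact erase_filter f.items (r, c) o hnd hitem
          rw [hfe, hq2, List.map_erase t2i_inj]
          have := hperm.erase (t2i (o, r, c))
          simpa [t2i] using this
        · have hsub : (f.erase (r, c)).keys.Sublist f.keys :=
            List.Sublist.map _ List.filter_sublist
          exact hnd.sublist hsub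
        · intro e he
          exact hrange e ((List.erase_sublist ..).mem (hq2 ▸ he))
        · intro y
          rw [Bool.eq_iff_iff]
          have hy := hvis y
          by_cases hyb : y = (r, c)
          · subst hyb
            constructor
            · intro _
              simp
            · intro _
              rw [hy]
              have : f.contains (r, c) = true := (dict_contains_iff f (r, c)).2 ⟨o, hitem⟩
              simp [this]
          · rw [dict_contains_erase f _ _ hyb, hy]
            have hadd : (s.add (r, c)).contains y = s.contains y := by
              rw [Bool.eq_iff_iff, PySem.Set.contains_iff, PySem.Set.contains_iff]
              constructor
              · intro h'
                rcases (PySem.Set.mem_add _ _ _).1 h' with h'' | h''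
                · exact h''
                · exact absurd h'' hyb
              · intro h'
                exact (PySem.Set.mem_add _ _ _).2 (Or.inl h')
            rw [hadd]
      obtain ⟨hr0, hrm, hc0, hcn⟩ := hrng
      simp only [goA, goB, hQ, hscan, List.foldl]
      by_cases hcorner : r = m - 1 ∧ c = n - 1
      · rw [if_pos hcorner, if_pos hcorner]
      · rw [if_neg hcorner, if_neg hcorner]
        exact ih _ _ _ _
          (step_rel grid m n o r c (-1) 0 (r - 1) c (by ring) (by ring) (by omega) (by omega)
            (step_rel grid m n o r c 1 0 (r + 1) c (by ring) (by ring) (by omega) (by omega)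
              (step_rel grid m n o r c 0 (-1) r (c - 1) (by ring) (by ring) (by omega) (by omega)
                (step_rel grid m n o r c 0 1 r (c + 1) (by ring) (by ring) (by omega) (by omega)
                  hbase))))

-- ===== VERDICT (by name: the statement is the Claim_ definition above) =====
theorem minimumObstacles2_spec : Claim_equal_minimumObstacles2 := by
  intro grid _ hpre
  obtain ⟨hne, hw, _⟩ := hpre
  unfold Spec_minimumObstacles2 minimumObstacles2 minimumObstacles2_alt
  apply go_eq
  refine ⟨?_, ?_, ?_, ?_⟩
  · have hinit : (PySem.Dict.ofList [(((0 : Int), (0 : Int)), (0 : Int))]).items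
        = [(((0 : Int), (0 : Int)), (0 : Int))] := by decide
    rw [hinit]
    rfl
  · decide
  · intro e he
    simp only [List.mem_singleton] at he
    subst he
    cases grid with
    | nil => exact absurd rfl hne
    | cons row rows =>
      have hn : ((PySem.List.pyGet? (row :: rows) 0).getD []) = row := by
        simp [PySem.List.pyGet?, PySem.List.pyIdx?]
      simp only [List.headD] at hw
      refine ⟨le_refl _, ?_, le_refl _, ?_⟩
      · change (0 : Int) < _
        exact_mod_cast Nat.succ_pos rows.length
      · change (0 : Int) < _
        rw [hn]
        exact_mod_cast hw
  · intro y
    have hinit : (PySem.Dict.ofList [(((0 : Int), (0 : Int)), (0 : Int))]).items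
        = [(((0 : Int), (0 : Int)), (0 : Int))] := by decide
    rw [Bool.eq_iff_iff]
    constructor
    · intro h
      have := (PySem.Set.contains_iff _ _).1 h
      rw [PySem.Set.mem_ofList] at this
      simp only [List.mem_singleton] at this
      subst this
      have : (PySem.Dict.ofList [(((0 : Int), (0 : Int)), (0 : Int))]).contains
          ((0 : Int), (0 : Int)) = true := by
        apply (dict_contains_iff _ _).2
        exact ⟨0, by rw [hinit]; exact List.mem_singleton.2 rfl⟩
      simp [this]
    · intro h
      rw [Bool.or_eq_true] at h
      rcases h with h' | h'
      · exact Bool.noConfusion h'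
      · obtain ⟨v, hv⟩ := (dict_contains_iff _ _).1 h'
        rw [hinit] at hv
        simp only [List.mem_singleton, Prod.mk.injEq] at hv
        apply (PySem.Set.contains_iff _ _).2
        rw [PySem.Set.mem_ofList]
        simp [hv.1]
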